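-- pv_equiv track=rewrite | github.com/khw5123/Project | Algorithm/Programmers/숫자 게임.py | solution
-- ===== SOURCE A (Python) =====
-- import bisect
--
-- def solution(A, B):
--     answer = 0
--     A.sort()
--     B.sort()
--     for n in A:
--         idx = bisect.bisect(B, n)
--         if idx != len(B):
--             del B[bisect.bisect(B, n)]
--             answer += 1
--     return answer
-- ===== SOURCE B (Python) =====
-- def solution(A, B):
--     A.sort()
--     B.sort()
--     count = 0
--     i = 0
--     for b in B:
--         if i < len(A) and A[i] < b:
--             count += 1
--             i += 1
--     return count
-- ===== Notes on version B (the rewrite author's own statement) =====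
-- stated objective: faster
-- what changed: Replaced the per-element bisect-and-delete loop over A (each del is a linear shift) by a single two-pointer sweep over the two sorted lists that counts matches without ever mutating B.
import Mathlib
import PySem

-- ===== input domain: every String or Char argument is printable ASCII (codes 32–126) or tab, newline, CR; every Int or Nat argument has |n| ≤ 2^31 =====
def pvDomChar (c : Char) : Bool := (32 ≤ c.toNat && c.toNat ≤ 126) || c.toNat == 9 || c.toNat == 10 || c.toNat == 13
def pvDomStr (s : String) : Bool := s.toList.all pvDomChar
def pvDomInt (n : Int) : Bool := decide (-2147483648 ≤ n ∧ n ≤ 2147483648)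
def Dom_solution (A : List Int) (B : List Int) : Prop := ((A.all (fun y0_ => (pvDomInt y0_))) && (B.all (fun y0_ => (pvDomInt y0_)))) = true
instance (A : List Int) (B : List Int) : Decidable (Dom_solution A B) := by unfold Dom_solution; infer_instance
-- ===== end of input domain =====

-- B replaces A's bisect-and-delete loop by one two-pointer sweep over the sorted lists (faster, no
-- deletions). A mutates its arguments (sorts both, deletes from B); B only sorts them in place;
-- the equivalence proved here is about the RETURN value.

-- ===== PORT A =====
-- loop 'for n in A': idx = bisect.bisect(B, n); if idx != len(B): del B[bisect.bisect(B, n)]; answer += 1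
def solLoopA : List Int → List Int → Int → Int
  | [], _, answer => answer
  | n :: rest, B, answer =>
    if PySem.List.bisectRight B n ≠ B.length then
      solLoopA rest (B.eraseIdx (PySem.List.bisectRight B n)) (answer + 1)
    else
      solLoopA rest B answer

def solution (A : List Int) (B : List Int) : Int :=
  solLoopA (PySem.List.sorted A (fun x => x) false) (PySem.List.sorted B (fun x => x) false) 0

-- ===== PORT B =====
-- loop 'for b in B': if i < len(A) and A[i] < b: count += 1; i += 1
-- (the index i into sorted A is represented by the yet-unconsumed suffix of A)
def solLoopB : List Int → List Int → Int → Int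
  | _, [], count => count
  | A, b :: bs, count =>
    match A with
    | a :: as => if a < b then solLoopB as bs (count + 1) else solLoopB (a :: as) bs count
    | [] => solLoopB [] bs count

def solution_alt (A : List Int) (B : List Int) : Int :=
  solLoopB (PySem.List.sorted A (fun x => x) false) (PySem.List.sorted B (fun x => x) false) 0

-- ===== PRECONDITION & SPEC =====
def Spec_solution (A : List Int) (B : List Int) (out : Int) : Prop := out = solution_alt A B
instance (A : List Int) (B : List Int) (out : Int) : Decidable (Spec_solution A B out) := by unfold Spec_solution; infer_instance

-- ===== CLAIM (what is proved, stated in full; the proofs are below) =====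
def Claim_equal_solution : Prop := ∀ (A : List Int) (B : List Int), Dom_solution A B → Spec_solution A B (solution A B)

-- ===== LEMMAS AND PROOFS =====

-- bisect_right is the unique cut point on a sorted list
lemma br_unique (xs : List Int) (n : Int) (k : Nat)
    (hs : xs.Pairwise (· ≤ ·)) (hk : k ≤ xs.length)
    (h1 : ∀ j (hj : j < xs.length), j < k → xs[j] ≤ n)
    (h2 : ∀ j (hj : j < xs.length), k ≤ j → n < xs[j]) :
    PySem.List.bisectRight xs n = k := by
  obtain ⟨hm, hm1, hm2⟩ := PySem.List.bisectRight_spec xs n hs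
  set m := PySem.List.bisectRight xs n with hmdef
  rcases Nat.lt_trichotomy m k with h | h | h
  · have hml : m < xs.length := lt_of_lt_of_le h hk
    have := h1 m hml h
    have := hm2 m hml (le_refl m)
    omega
  · exact h
  · have hkl : k < xs.length := lt_of_lt_of_le h hm
    have := hm1 k hkl h
    have := h2 k hkl (le_refl k)
    omega

lemma br_cons_gt (b : Int) (bs : List Int) (n : Int)
    (hs : (b :: bs).Pairwise (· ≤ ·)) (hn : n < b) :
    PySem.List.bisectRight (b :: bs) n = 0 := by
  apply br_unique _ _ _ hs (Nat.zero_le _)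
  · intro j hj hj0; omega
  · intro j hj _
    rcases j with _ | j
    · simpa using hn
    · have hj' : j < bs.length := by simpa using hj
      have hb : b ≤ bs[j] := (List.pairwise_cons.mp hs).1 _ (bs.getElem_mem hj')
      have : n < bs[j] := lt_of_lt_of_le hn hb
      simpa using this

lemma br_cons_le (b : Int) (bs : List Int) (n : Int)
    (hs : (b :: bs).Pairwise (· ≤ ·)) (hn : b ≤ n) :
    PySem.List.bisectRight (b :: bs) n = PySem.List.bisectRight bs n + 1 := by
  have hs' : bs.Pairwise (· ≤ ·) := (List.pairwise_cons.mp hs).2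
  obtain ⟨hm, hm1, hm2⟩ := PySem.List.bisectRight_spec bs n hs'
  apply br_unique _ _ _ hs (by simpa using hm)
  · intro j hj hjk
    rcases j with _ | j
    · simpa using hn
    · have hj' : j < bs.length := by simpa using hj
      have : bs[j] ≤ n := hm1 j hj' (by omega)
      simpa using this
  · intro j hj hjk
    rcases j with _ | j
    · omega
    · have hj' : j < bs.length := by simpa using hj
      have : n < bs[j] := hm2 j hj' (by omega)
      simpa using this

-- A's loop does nothing on an empty B
lemma solLoopA_nil (A : List Int) (ans : Int) : solLoopA A [] ans = ans := by
  induction A generalizing ans with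
  | nil => rfl
  | cons a as ih => simp [solLoopA, PySem.List.bisectRight, PySem.List.bisectRightLoop, ih]

-- B's loop on an exhausted A just skips the rest of B
lemma solLoopB_nil (B : List Int) (c : Int) : solLoopB [] B c = c := by
  induction B with
  | nil => rfl
  | cons b bs ih => simp [solLoopB, ih]

-- a head of B that is ≤ every element of A is never removed by A's loop
lemma solLoopA_skip (A : List Int) (b : Int) (bs : List Int) (ans : Int)
    (hb : ∀ x ∈ A, b ≤ x) (hs : (b :: bs).Pairwise (· ≤ ·)) :
    solLoopA A (b :: bs) ans = solLoopA A bs ans := by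
  induction A generalizing bs ans with
  | nil => rfl
  | cons a as ih =>
    have hba : b ≤ a := hb a (by simp)
    have hbr := br_cons_le b bs a hs hba
    have hb' : ∀ x ∈ as, b ≤ x := fun x hx => hb x (by simp [hx])
    by_cases hc : PySem.List.bisectRight bs a = bs.length
    · have : solLoopA (a :: as) (b :: bs) ans = solLoopA as (b :: bs) ans := by
        simp [solLoopA, hbr, hc]
      rw [this, ih bs ans hb' hs]
      simp [solLoopA, hc]
    · have hlt : PySem.List.bisectRight bs a < bs.length :=
        lt_of_le_of_ne (PySem.List.bisectRight_spec bs a (List.pairwise_cons.mp hs).2).1 hc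
      have hsub : (b :: (bs.eraseIdx (PySem.List.bisectRight bs a))).Sublist (b :: bs) :=
        List.Sublist.cons₂ b (List.eraseIdx_sublist bs _)
      have hs2 : (b :: bs.eraseIdx (PySem.List.bisectRight bs a)).Pairwise (· ≤ ·) :=
        hs.sublist hsub
      have step : solLoopA (a :: as) (b :: bs) ans
          = solLoopA as (b :: bs.eraseIdx (PySem.List.bisectRight bs a)) (ans + 1) := by
        simp [solLoopA, hbr, hc]
      rw [step, ih _ _ hb' hs2]
      simp [solLoopA, hc]

-- main invariant: on sorted inputs the two loops agree for every accumulator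
lemma loops_agree (B A : List Int) (ans : Int)
    (hA : A.Pairwise (· ≤ ·)) (hB : B.Pairwise (· ≤ ·)) :
    solLoopA A B ans = solLoopB A B ans := by
  induction B generalizing A ans with
  | nil => simp [solLoopA_nil, solLoopB]
  | cons b bs ihB =>
    cases A with
    | nil => simp [solLoopA, solLoopB_nil]
    | cons a as =>
      have hA' : as.Pairwise (· ≤ ·) := (List.pairwise_cons.mp hA).2
      have hB' : bs.Pairwise (· ≤ ·) := (List.pairwise_cons.mp hB).2
      by_cases hab : a < b
      · have hbr : PySem.List.bisectRight (b :: bs) a = 0 := br_cons_gt b bs a hB hab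
        have step : solLoopA (a :: as) (b :: bs) ans = solLoopA as bs (ans + 1) := by
          simp [solLoopA, hbr]
        rw [step, ihB as (ans + 1) hA' hB']
        simp [solLoopB, hab]
      · have hba : b ≤ a := not_lt.mp hab
        have hb : ∀ x ∈ a :: as, b ≤ x := by
          intro x hx
          rcases List.mem_cons.mp hx with rfl | hx'
          · exact hba
          · exact le_trans hba ((List.pairwise_cons.mp hA).1 x hx')
        rw [solLoopA_skip (a :: as) b bs ans hb hB, ihB (a :: as) ans hA hB']
        simp [solLoopB, hab]

-- ===== VERDICT (by name: the statement is the Claim_ definition above) =====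
theorem solution_spec : Claim_equal_solution := by
  intro A B _
  unfold Spec_solution solution solution_alt
  exact loops_agree _ _ 0
    (PySem.List.sorted_pairwise A (fun x => x) )
    (PySem.List.sorted_pairwise B (fun x => x))
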